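-- pv_equiv track=rewrite | github.com/covelant-AI/blockjam-ai | src/services/analysis/deadtime.py | find_false_sequences
-- ===== SOURCE A (Python) =====
-- def find_false_sequences(data, min_seconds, time_per_value, fps):
--     """
--     Identify sequences of False values longer than min_seconds,
--     given each data point represents time_per_value seconds.
--
--     Parameters:
--     - data: list of bools
--     - min_seconds: int, minimum length in seconds of False sequence to consider
--     - time_per_value: int, number of seconds each data point represents
--
--     Returns:
--     - List of tuples (start_index, end_index) for False sequences
--     - Prints readable time ranges and total time saved
--     """
--     false_sequences = []
--     in_sequence = False
--     start_index = -1
--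
--     min_length = min_seconds // time_per_value
--
--     for i, value in enumerate(data):
--         if not value and not in_sequence:
--             in_sequence = True
--             start_index = i
--         elif value and in_sequence:
--             in_sequence = False
--             if i - start_index >= min_length:
--                 false_sequences.append((start_index, i - 1))
--             start_index = -1
--
--     # Handle case where sequence goes to end of list
--     if in_sequence and len(data) - start_index >= min_length:
--         false_sequences.append((start_index, len(data) - 1))
--
--     return false_sequences
-- ===== SOURCE B (Python) =====
-- from itertools import groupby
--
-- def find_false_sequences(data, min_seconds, time_per_value, fps):
--     min_length = min_seconds // time_per_value
--     result = []
--     start = 0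
--     for key, group in groupby(data):
--         length = sum(1 for _ in group)
--         if not key and length >= min_length:
--             result.append((start, start + length - 1))
--         start += length
--     return result
-- ===== Notes on version B (the rewrite author's own statement) =====
-- stated objective: simpler
-- what changed: Replaces the hand-rolled in_sequence/start_index state machine (with its separate end-of-list epilogue) by itertools.groupby over maximal runs: each False run of sufficient length directly yields (start, start+length-1).
import Mathlib
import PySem

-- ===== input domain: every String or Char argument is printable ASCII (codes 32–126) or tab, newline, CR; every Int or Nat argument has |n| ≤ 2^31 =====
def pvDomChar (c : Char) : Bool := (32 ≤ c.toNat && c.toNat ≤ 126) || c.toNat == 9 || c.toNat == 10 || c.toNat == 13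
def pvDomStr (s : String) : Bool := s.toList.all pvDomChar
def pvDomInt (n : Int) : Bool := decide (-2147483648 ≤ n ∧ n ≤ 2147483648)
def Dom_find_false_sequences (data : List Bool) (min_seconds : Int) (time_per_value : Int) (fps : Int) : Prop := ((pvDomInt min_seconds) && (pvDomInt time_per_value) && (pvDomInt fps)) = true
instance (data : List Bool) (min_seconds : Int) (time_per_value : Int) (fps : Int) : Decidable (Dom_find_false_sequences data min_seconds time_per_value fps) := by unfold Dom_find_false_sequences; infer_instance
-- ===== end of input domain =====

-- B replaces A's in_sequence/start_index state machine (with its end-of-list epilogue)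
-- by grouping the data into maximal runs and emitting each long-enough False run directly (objective: simpler).

-- ===== PORT A =====
-- the for-loop over enumerate(data): state (false_sequences, in_sequence, start_index), index i
def ffsLoopA (min_length : Int) : List Bool → Int → List (Int × Int) × Bool × Int → List (Int × Int) × Bool × Int
  | [], _, st => st
  | v :: rest, i, (fs, inSeq, start) =>
    ffsLoopA min_length rest (i + 1)
      (if !v && !inSeq then (fs, true, i)
       else if v && inSeq then
         ((if i - start ≥ min_length then fs ++ [(start, i - 1)] else fs), false, -1)
       else (fs, inSeq, start))

def find_false_sequences (data : List Bool) (min_seconds : Int) (time_per_value : Int) (fps : Int) : List (Int × Int) :=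
  let min_length := PySem.Int.floordiv min_seconds time_per_value
  match ffsLoopA min_length data 0 ([], false, -1) with
  | (fs, inSeq, start) =>
    -- handle case where sequence goes to end of list
    if inSeq ∧ (data.length : Int) - start ≥ min_length then fs ++ [(start, (data.length : Int) - 1)]
    else fs

-- ===== PORT B =====
-- maximal runs of equal values (itertools.groupby): each run as (value, length)
def ffsRuns : List Bool → List (Bool × Nat)
  | [] => []
  | x :: xs =>
    (x, 1 + (xs.takeWhile (· == x)).length) :: ffsRuns (xs.dropWhile (· == x))
  termination_by l => l.length
  decreasing_by simp; exact List.length_dropWhile_le _ _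

-- emit (start, start+length-1) for each False run of length ≥ min_length, tracking the running start
def ffsEmit (min_length : Int) : List (Bool × Nat) → Int → List (Int × Int)
  | [], _ => []
  | (v, n) :: rest, start =>
    (if v = false ∧ (n : Int) ≥ min_length then [(start, start + (n : Int) - 1)] else [])
      ++ ffsEmit min_length rest (start + (n : Int))

def find_false_sequences_alt (data : List Bool) (min_seconds : Int) (time_per_value : Int) (fps : Int) : List (Int × Int) :=
  ffsEmit (PySem.Int.floordiv min_seconds time_per_value) (ffsRuns data) 0

-- ===== PRECONDITION & SPEC =====
-- Pre_ excludes exactly time_per_value = 0, where Python's '//' raises ZeroDivisionError (in A and in B alike).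
def Pre_find_false_sequences (data : List Bool) (min_seconds : Int) (time_per_value : Int) (fps : Int) : Prop :=
  time_per_value ≠ 0
instance (data : List Bool) (min_seconds : Int) (time_per_value : Int) (fps : Int) : Decidable (Pre_find_false_sequences data min_seconds time_per_value fps) := by unfold Pre_find_false_sequences; infer_instance

def pvWitness_find_false_sequences : List Bool × Int × Int × Int := ([true, false, false, true, false], 2, 1, 30)

def Spec_find_false_sequences (data : List Bool) (min_seconds : Int) (time_per_value : Int) (fps : Int) (out : List (Int × Int)) : Prop := out = find_false_sequences_alt data min_seconds time_per_value fps
instance (data : List Bool) (min_seconds : Int) (time_per_value : Int) (fps : Int) (out : List (Int × Int)) : Decidable (Spec_find_false_sequences data min_seconds time_per_value fps out) := by unfold Spec_find_false_sequences; infer_instance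

-- ===== CLAIM (what is proved, stated in full; the proofs are below) =====
def Claim_equal_find_false_sequences : Prop := ∀ (data : List Bool) (min_seconds : Int) (time_per_value : Int) (fps : Int), Dom_find_false_sequences data min_seconds time_per_value fps → Pre_find_false_sequences data min_seconds time_per_value fps → Spec_find_false_sequences data min_seconds time_per_value fps (find_false_sequences data min_seconds time_per_value fps)

-- ===== LEMMAS AND PROOFS =====

-- the end-of-list epilogue of A as a function of the final state
def ffsPost (min_length endI : Int) : List (Int × Int) × Bool × Int → List (Int × Int)
  | (fs, inSeq, start) =>
    if inSeq ∧ endI - start ≥ min_length then fs ++ [(start, endI - 1)] else fs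

theorem ffsA_eq_post (data : List Bool) (ms tpv fps : Int) :
    find_false_sequences data ms tpv fps =
      ffsPost (PySem.Int.floordiv ms tpv) (data.length : Int)
        (ffsLoopA (PySem.Int.floordiv ms tpv) data 0 ([], false, -1)) := by
  simp [find_false_sequences, ffsPost]

-- the leading maximal run of a nonempty list, as ffsRuns produces it
theorem ffs_run_spec (x : Bool) (xs : List Bool) :
    ∃ t rest, 1 ≤ t ∧ x :: xs = List.replicate t x ++ rest ∧
      ffsRuns (x :: xs) = (x, t) :: ffsRuns rest ∧
      (x :: xs).length = t + rest.length ∧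
      ∀ y r, rest = y :: r → y ≠ x := by
  refine ⟨1 + (xs.takeWhile (· == x)).length, xs.dropWhile (· == x), by omega, ?_, by rw [ffsRuns], ?_, ?_⟩
  · have h : xs.takeWhile (· == x) = List.replicate (xs.takeWhile (· == x)).length x := by
      apply List.eq_replicate_of_mem
      intro b hb
      have := List.mem_takeWhile_imp hb
      simpa using this
    calc x :: xs = x :: (xs.takeWhile (· == x) ++ xs.dropWhile (· == x)) := by
          rw [List.takeWhile_append_dropWhile]
      _ = List.replicate (1 + (xs.takeWhile (· == x)).length) x ++ xs.dropWhile (· == x) := by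
          rw [Nat.add_comm, List.replicate_succ, List.cons_append, ← h]
  · have h2 := congrArg List.length (List.takeWhile_append_dropWhile (p := (· == x)) (l := xs))
    simp only [List.length_append] at h2
    simp only [List.length_cons]
    omega
  · intro y r hr
    have := List.head?_dropWhile_not (· == x) xs
    rw [hr] at this
    simpa using this

-- loop skips true values when not in a sequence, preserving the state
theorem loopA_skip_true (ml : Int) (k : Nat) (r : List Bool) (s : Int) (fs : List (Int × Int)) :
    ∀ i : Int, ffsLoopA ml (List.replicate k true ++ r) i (fs, false, s) = ffsLoopA ml r (i + k) (fs, false, s) := by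
  induction k with
  | zero => intro i; simp
  | succ n ih =>
    intro i
    rw [List.replicate_succ, List.cons_append]
    simp only [ffsLoopA]
    norm_num
    rw [ih]
    congr 1
    ring

-- loop consumes further false values while in a sequence, preserving the state
theorem loopA_skip_false (ml : Int) (k : Nat) (r : List Bool) (s : Int) (fs : List (Int × Int)) :
    ∀ i : Int, ffsLoopA ml (List.replicate k false ++ r) i (fs, true, s) = ffsLoopA ml r (i + k) (fs, true, s) := by
  induction k with
  | zero => intro i; simp
  | succ n ih =>
    intro i
    rw [List.replicate_succ, List.cons_append]
    simp only [ffsLoopA]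
    norm_num
    rw [ih]
    congr 1
    ring

-- entering a false run: k ≥ 1 false values from a not-in-sequence state
theorem loopA_enter_false (ml : Int) (k : Nat) (hk : 1 ≤ k) (r : List Bool) (i s : Int) (fs : List (Int × Int)) :
    ffsLoopA ml (List.replicate k false ++ r) i (fs, false, s) = ffsLoopA ml r (i + k) (fs, true, i) := by
  obtain ⟨m, rfl⟩ : ∃ m, k = m + 1 := ⟨k - 1, by omega⟩
  rw [List.replicate_succ, List.cons_append]
  simp only [ffsLoopA]
  norm_num
  rw [loopA_skip_false]
  congr 1
  ring

-- MAIN INVARIANT: from a not-in-sequence state, the loop followed by the epilogue appends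
-- exactly what ffsEmit produces over the maximal runs of the remaining data.
theorem loopA_emit (ml : Int) : ∀ (data : List Bool) (i : Int) (fs : List (Int × Int)),
    ffsPost ml (i + (data.length : Int)) (ffsLoopA ml data i (fs, false, -1)) =
      fs ++ ffsEmit ml (ffsRuns data) i
  | [], i, fs => by simp [ffsLoopA, ffsRuns, ffsEmit, ffsPost]
  | x :: xs, i, fs => by
    obtain ⟨t, rest, ht1, hdec, hruns, hlen, hhead⟩ := ffs_run_spec x xs
    cases x with
    | true =>
      -- a true run is skipped by the loop and emits nothing
      conv_lhs => rw [hdec]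
      rw [loopA_skip_true, ← hdec]
      rw [show ((true :: xs).length : Int) = ((t + rest.length : Nat) : Int) by rw [hlen]]
      push_cast
      rw [show i + ((t : Int) + (rest.length : Int)) = (i + (t : Int)) + (rest.length : Int) by ring]
      rw [loopA_emit ml rest (i + (t : Int)) fs, hruns, ffsEmit]
      norm_num
    | false =>
      conv_lhs => rw [hdec]
      rw [loopA_enter_false ml t ht1, ← hdec]
      match hr : rest with
      | [] =>
        -- the false run reaches the end of the list: A's epilogue fires
        subst hr
        rw [ffsLoopA, hruns, ffsEmit, ffsRuns, ffsEmit]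
        simp only [List.length_nil, Nat.add_zero] at hlen
        rw [show ((false :: xs).length : Int) = (t : Int) by rw [hlen]]
        simp only [ffsPost]
        by_cases h : (t : Int) ≥ ml
        · rw [if_pos ⟨by trivial, by omega⟩, if_pos ⟨by trivial, h⟩]
          simp
        · rw [if_neg (by rintro ⟨_, hc⟩; omega), if_neg (by rintro ⟨_, hc⟩; exact h hc)]
          simp
      | y :: rest' =>
        -- the run is followed by a different value, i.e. true: the loop closes the sequence
        have hy : y = true := by
          have := hhead y rest' rfl
          cases y
          · exact absurd rfl this
          · rfl
        subst hy
        -- one loop step closes the false sequence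
        simp only [ffsLoopA]
        norm_num
        -- decompose the leading true run of the remainder
        obtain ⟨u, rest2, hu1, hdec2, hruns2, hlen2, _⟩ := ffs_run_spec true rest'
        have hdec2' : rest' = List.replicate (u - 1) true ++ rest2 := by
          have h1 : true :: rest' = List.replicate (u - 1 + 1) true ++ rest2 := by
            rw [show u - 1 + 1 = u by omega]; exact hdec2
          rw [List.replicate_succ] at h1
          simpa using h1
        conv_lhs => rw [hdec2']
        rw [loopA_skip_true]
        have hidx : i + (t : Int) + 1 + ((u - 1 : Nat) : Int) = i + (t : Int) + (u : Int) := by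
          push_cast [Nat.cast_sub hu1]
          ring
        rw [hidx]
        have hlentot : (false :: xs).length = t + u + rest2.length := by
          rw [hlen, hlen2]; omega
        rw [show i + ((xs.length : Int) + 1) = (i + (t : Int) + (u : Int)) + (rest2.length : Int) by
          have h2 := hlentot; simp only [List.length_cons] at h2; omega]
        rw [loopA_emit ml rest2 (i + (t : Int) + (u : Int)) _]
        rw [hruns, hruns2, ffsEmit, ffsEmit]
        by_cases h : ml ≤ (t : Int)
        · rw [if_pos h, if_pos (show false = false ∧ ((t : Nat) : Int) ≥ ml from ⟨rfl, by omega⟩),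
            if_neg (show ¬ (true = false ∧ ((u : Nat) : Int) ≥ ml) from by simp)]
          simp
        · rw [if_neg h, if_neg (show ¬ (false = false ∧ ((t : Nat) : Int) ≥ ml) from by rintro ⟨_, hc⟩; omega),
            if_neg (show ¬ (true = false ∧ ((u : Nat) : Int) ≥ ml) from by simp)]
          simp
termination_by data => data.length
decreasing_by
  · omega
  · omega

-- ===== VERDICT (by name: the statement is the Claim_ definition above) =====
theorem find_false_sequences_spec : Claim_equal_find_false_sequences := by
  intro data ms tpv fps _ _
  unfold Spec_find_false_sequences find_false_sequences_alt
  rw [ffsA_eq_post]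
  have := loopA_emit (PySem.Int.floordiv ms tpv) data 0 []
  simpa using this
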